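-- pv_equiv track=rewrite | github.com/jmdall/lirecouleur | tests/lirecouleur.py | generer_masque_phonemes
-- ===== SOURCE A (Python) =====
-- def generer_masque_phonemes(phonemes, l_phon):
-- 	mask = []
-- 	if type(phonemes) == type(list):
-- 		return mask
--
-- 	i = 0
-- 	nb_phon = len(phonemes)
-- 	nb_l_phon = len(l_phon)
-- 	while i < nb_phon:
-- 		phon = phonemes[i][0].split('_')[0]
-- 		if phon == l_phon[0]:
-- 			j = 1
-- 			k = i+1
-- 			trouve = True
-- 			while (k < nb_phon) and trouve and (j < nb_l_phon):
-- 				phon = phonemes[k][0].split('_')[0]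
-- 				trouve = (phon == l_phon[j])
-- 				j += 1
-- 				k += 1
-- 			if trouve and (j == nb_l_phon):
-- 				# on est arrivé à la fin du pattern
-- 				mask.extend([1 for u in range(nb_l_phon)])
-- 				i += nb_l_phon
-- 			else:
-- 				# on n'a pas trouvé le pattern complet
-- 				mask.append(0)
-- 				i += 1
-- 		else:
-- 			mask.append(0)
-- 			i += 1
-- 	return mask
-- ===== SOURCE B (Python) =====
-- def generer_masque_phonemes(phonemes, l_phon):
--     if type(phonemes) == type(list):
--         return []
--     keys = [p[0].split('_')[0] for p in phonemes]
--     n = len(keys)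
--     m = len(l_phon)
--     # stage 1: refine the candidate start set once per pattern element
--     # (loop over the pattern, not over positions)
--     starts = list(range(n))
--     for j, p in enumerate(l_phon):
--         starts = [i for i in starts if i + j < n and keys[i + j] == p]
--     # stage 2: assemble the mask from the sorted match starts, skipping overlaps
--     mask = []
--     pos = 0
--     for s in starts:
--         if pos <= s:
--             mask.extend([0] * (s - pos))
--             mask.extend([1] * m)
--             pos = s + m
--     mask.extend([0] * (n - pos))
--     return mask
-- ===== Notes on version B (the rewrite author's own statement) =====
-- stated objective: alternative
-- what changed: B inverts the loop structure: instead of A's position-by-position scan with an inner verification loop, it refines a candidate start set once per pattern element (pattern-major passes) and then assembles the mask arithmetically from the sorted match starts, skipping overlapping starts.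
import Mathlib
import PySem

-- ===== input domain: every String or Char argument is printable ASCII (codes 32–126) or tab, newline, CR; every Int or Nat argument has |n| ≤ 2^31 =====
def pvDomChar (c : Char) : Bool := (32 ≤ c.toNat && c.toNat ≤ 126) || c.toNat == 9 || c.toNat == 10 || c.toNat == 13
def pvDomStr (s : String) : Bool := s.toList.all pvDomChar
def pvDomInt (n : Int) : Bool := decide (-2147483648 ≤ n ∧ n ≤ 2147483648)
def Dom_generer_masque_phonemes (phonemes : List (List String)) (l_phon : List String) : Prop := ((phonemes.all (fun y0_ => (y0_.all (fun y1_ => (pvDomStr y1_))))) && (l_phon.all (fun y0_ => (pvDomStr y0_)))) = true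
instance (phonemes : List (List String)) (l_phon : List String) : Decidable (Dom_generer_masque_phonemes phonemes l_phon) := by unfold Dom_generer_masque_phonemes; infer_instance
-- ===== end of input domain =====

-- B inverts the loop structure (alternative, same cost): a candidate-start set refined once per
-- pattern element, then the mask assembled from the sorted match starts with overlap skipping.


-- ===== PORT A =====
-- p[0].split('_')[0]; headD "" stands for p[0] / [0] where Python would raise (excluded by Pre_)
def pvKey (p : List String) : String := ((PySem.Str.split? (p.headD "") "_").getD []).headD ""

-- inner while loop of A: returns the final (trouve, j)
def pvInnerA (phonemes : List (List String)) (l_phon : List String) (k j : Nat) (trouve : Bool) : Bool × Nat :=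
  if h : k < phonemes.length ∧ trouve = true ∧ j < l_phon.length then
    pvInnerA phonemes l_phon (k+1) (j+1) (pvKey (phonemes.getD k []) == l_phon.getD j "")
  else (trouve, j)
termination_by phonemes.length - k
decreasing_by omega

-- outer while loop of A; the conjunct '0 < l_phon.length' is only a totality guard:
-- in Python j starts at 1 and never decreases, so 'j == nb_l_phon' already implies it
def pvOuterA (phonemes : List (List String)) (l_phon : List String) (i : Nat) (mask : List Int) : List Int :=
  if h : i < phonemes.length then
    if pvKey (phonemes.getD i []) == l_phon.headD "" then
      if hm : (pvInnerA phonemes l_phon (i+1) 1 true).1 = true ∧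
              (pvInnerA phonemes l_phon (i+1) 1 true).2 = l_phon.length ∧ 0 < l_phon.length then
        pvOuterA phonemes l_phon (i + l_phon.length) (mask ++ List.replicate l_phon.length (1 : Int))
      else
        pvOuterA phonemes l_phon (i+1) (mask ++ [0])
    else
      pvOuterA phonemes l_phon (i+1) (mask ++ [0])
  else mask
termination_by phonemes.length - i
decreasing_by all_goals omega

-- 'type(phonemes) == type(list)' is always False for a list argument, so that early return is dead code
def generer_masque_phonemes (phonemes : List (List String)) (l_phon : List String) : List Int :=
  pvOuterA phonemes l_phon 0 []

-- ===== PORT B =====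
-- 'for j, p in enumerate(l_phon): starts = [i for i in starts if i+j < n and keys[i+j] == p]'
def pvRefine (keys : List String) (n : Nat) (pat : List String) (j : Nat) (st : List Nat) : List Nat :=
  match pat with
  | [] => st
  | p :: rest =>
      pvRefine keys n rest (j+1) (st.filter (fun i => decide (i + j < n) && (keys.getD (i+j) "" == p)))

-- one iteration of B's emit loop: 'if pos <= s: zeros, ones, pos = s+m'
def pvEmitStep (m : Nat) (acc : List Int × Nat) (s : Nat) : List Int × Nat :=
  if acc.2 ≤ s then (acc.1 ++ List.replicate (s - acc.2) (0 : Int) ++ List.replicate m (1 : Int), s + m)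
  else acc

def generer_masque_phonemes_alt (phonemes : List (List String)) (l_phon : List String) : List Int :=
  let keys := phonemes.map pvKey
  let n := keys.length
  let starts := pvRefine keys n l_phon 0 (List.range n)
  let r := starts.foldl (pvEmitStep l_phon.length) ([], 0)
  r.1 ++ List.replicate (n - r.2) (0 : Int)

-- ===== PRECONDITION & SPEC =====
-- Pre_ excludes exactly the inputs where Python A raises IndexError: a nonempty phonemes list
-- together with an empty pattern (l_phon[0]) or with some empty inner list (phonemes[i][0]).
def Pre_generer_masque_phonemes (phonemes : List (List String)) (l_phon : List String) : Prop :=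
  phonemes = [] ∨ (l_phon ≠ [] ∧ ∀ p ∈ phonemes, p ≠ [])
instance (phonemes : List (List String)) (l_phon : List String) : Decidable (Pre_generer_masque_phonemes phonemes l_phon) := by unfold Pre_generer_masque_phonemes; infer_instance

def pvWitness_generer_masque_phonemes : List (List String) × List String := ([["a_x"], ["b"]], ["a", "b"])

def Spec_generer_masque_phonemes (phonemes : List (List String)) (l_phon : List String) (out : List Int) : Prop := out = generer_masque_phonemes_alt phonemes l_phon
instance (phonemes : List (List String)) (l_phon : List String) (out : List Int) : Decidable (Spec_generer_masque_phonemes phonemes l_phon out) := by unfold Spec_generer_masque_phonemes; infer_instance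

-- ===== CLAIM (what is proved, stated in full; the proofs are below) =====
def Claim_equal_generer_masque_phonemes : Prop := ∀ (phonemes : List (List String)) (l_phon : List String), Dom_generer_masque_phonemes phonemes l_phon → Pre_generer_masque_phonemes phonemes l_phon → Spec_generer_masque_phonemes phonemes l_phon (generer_masque_phonemes phonemes l_phon)

-- ===== LEMMAS AND PROOFS =====

-- proof-side intermediate: the greedy left-to-right scan over the key list, window per window
def pvScanB (keys : List String) (l_phon : List String) (i : Nat) : List Int :=
  if h : i < keys.length then
    if hm : (keys.drop i).take l_phon.length = l_phon ∧ 0 < l_phon.length then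
      List.replicate l_phon.length (1 : Int) ++ pvScanB keys l_phon (i + l_phon.length)
    else
      (0 : Int) :: pvScanB keys l_phon (i+1)
  else []
termination_by keys.length - i
decreasing_by all_goals omega

theorem pvKey_nil : pvKey [] = "" := by decide

theorem pvKey_getD (ph : List (List String)) (k : Nat) :
    pvKey (ph.getD k []) = (ph.map pvKey).getD k "" := by
  rw [List.getD_eq_getElem?_getD, List.getD_eq_getElem?_getD, List.getElem?_map]
  cases hk : ph[k]? <;> simp [pvKey_nil]

theorem drop_getD {α : Type} (dflt : α) (l : List α) (k : Nat) (h : k < l.length) :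
    l.drop k = l.getD k dflt :: l.drop (k+1) := by
  rw [List.drop_eq_getElem_cons h]
  congr 1
  simp [List.getD_eq_getElem?_getD, h]

theorem pvInnerA_false (ph : List (List String)) (pat : List String) (k j : Nat) :
    pvInnerA ph pat k j false = (false, j) := by
  rw [pvInnerA]; simp

-- characterisation of A's inner verification loop as a window equality on the key list
theorem pvInnerA_spec (ph : List (List String)) (pat : List String) :
    ∀ d k j, ph.length - k ≤ d → k ≤ ph.length → j ≤ pat.length →
    (pvInnerA ph pat k j true = (true, pat.length) ↔
      ((ph.map pvKey).drop k).take (pat.length - j) = pat.drop j) := by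
  intro d
  induction d with
  | zero =>
    intro k j hd hk hj
    rw [pvInnerA, dif_neg (by rintro ⟨h, -, -⟩; omega)]
    have hdrop : (ph.map pvKey).drop k = [] :=
      List.drop_eq_nil_of_le (by rw [List.length_map]; omega)
    rw [hdrop, List.take_nil]
    constructor
    · intro h
      have hjm : j = pat.length := congrArg Prod.snd h
      rw [hjm]
      exact (List.drop_eq_nil_of_le (le_refl _)).symm
    · intro h
      have hlen := congrArg List.length h
      simp at hlen
      have hjm : j = pat.length := by omega
      rw [hjm]
  | succ d ih =>
    intro k j hd hk hj
    by_cases hkn : k < ph.length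
    · by_cases hjm : j < pat.length
      · rw [pvInnerA, dif_pos ⟨hkn, rfl, hjm⟩]
        have hkeys : ((ph.map pvKey).drop k) =
            (ph.map pvKey).getD k "" :: (ph.map pvKey).drop (k+1) :=
          drop_getD "" _ k (by rw [List.length_map]; omega)
        have hpat : pat.drop j = pat.getD j "" :: pat.drop (j+1) := drop_getD "" pat j hjm
        have hm1 : pat.length - j = (pat.length - (j+1)) + 1 := by omega
        by_cases hb : pvKey (ph.getD k []) = pat.getD j ""
        · rw [show (pvKey (ph.getD k []) == pat.getD j "") = true from beq_iff_eq.mpr hb]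
          rw [ih (k+1) (j+1) (by omega) (by omega) (by omega)]
          rw [hkeys, hpat, hm1, List.take_succ_cons]
          have hk2 : (ph.map pvKey).getD k "" = pat.getD j "" := by
            rw [← pvKey_getD]; exact hb
          rw [hk2]
          constructor
          · intro h; rw [h]
          · intro h; exact (List.cons.inj h).2
        · rw [show (pvKey (ph.getD k []) == pat.getD j "") = false from
            beq_eq_false_iff_ne.mpr hb, pvInnerA_false]
          constructor
          · intro h
            exact absurd (congrArg Prod.fst h) (by simp)
          · intro h
            exfalso
            rw [hkeys, hpat, hm1, List.take_succ_cons] at h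
            apply hb
            rw [pvKey_getD]
            exact (List.cons.inj h).1
      · have hj' : j = pat.length := by omega
        rw [pvInnerA, dif_neg (by rintro ⟨-, -, h⟩; omega)]
        rw [hj']
        simp [List.drop_eq_nil_of_le (le_refl pat.length)]
    · rw [pvInnerA, dif_neg (by rintro ⟨h, -, -⟩; omega)]
      have hdrop : (ph.map pvKey).drop k = [] :=
        List.drop_eq_nil_of_le (by rw [List.length_map]; omega)
      rw [hdrop, List.take_nil]
      constructor
      · intro h
        have hjm : j = pat.length := congrArg Prod.snd h
        rw [hjm]
        exact (List.drop_eq_nil_of_le (le_refl _)).symm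
      · intro h
        have hlen := congrArg List.length h
        simp at hlen
        have hjm : j = pat.length := by omega
        rw [hjm]

-- the whole-window condition A tests at position i equals the scan's slice test
theorem branch_iff (ph : List (List String)) (pat : List String) (i : Nat) (hi : i < ph.length) :
    ((pvKey (ph.getD i []) == pat.headD "") = true ∧
      (pvInnerA ph pat (i+1) 1 true).1 = true ∧
      (pvInnerA ph pat (i+1) 1 true).2 = pat.length ∧ 0 < pat.length) ↔
    (((ph.map pvKey).drop i).take pat.length = pat ∧ 0 < pat.length) := by
  by_cases hm : 0 < pat.length
  · have hinner := pvInnerA_spec ph pat (ph.length - (i+1)) (i+1) 1 (le_refl _) (by omega) (by omega)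
    have hkeys : ((ph.map pvKey).drop i) = (ph.map pvKey).getD i "" :: (ph.map pvKey).drop (i+1) :=
      drop_getD "" _ i (by rw [List.length_map]; omega)
    have hpat : pat = pat.getD 0 "" :: pat.drop 1 := by
      have h := drop_getD "" pat 0 hm
      simpa using h
    have hhead : pat.headD "" = pat.getD 0 "" := by
      cases pat with
      | nil => simp at hm
      | cons a l => rfl
    have hm1 : pat.length = (pat.length - 1) + 1 := by omega
    constructor
    · rintro ⟨h1, h2, h3, -⟩
      refine ⟨?_, hm⟩
      have hw : ((ph.map pvKey).drop (i+1)).take (pat.length - 1) = pat.drop 1 :=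
        hinner.mp (Prod.ext h2 h3)
      have hkd : (ph.map pvKey).getD i "" = pat.getD 0 "" := by
        rw [← pvKey_getD, beq_iff_eq.mp h1, hhead]
      rw [hkeys, hm1, List.take_succ_cons, hw, hkd]
      exact hpat.symm
    · rintro ⟨hwin, -⟩
      have hexp : (ph.map pvKey).getD i "" ::
          ((ph.map pvKey).drop (i+1)).take (pat.length - 1) = pat.getD 0 "" :: pat.drop 1 := by
        rw [← List.take_succ_cons, ← hm1, ← hkeys, hwin]
        exact hpat
      have hpair := List.cons.inj hexp
      have hrec := hinner.mpr hpair.2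
      refine ⟨?_, congrArg Prod.fst hrec, congrArg Prod.snd hrec, hm⟩
      apply beq_iff_eq.mpr
      rw [pvKey_getD, hhead]
      exact hpair.1
  · constructor
    · rintro ⟨-, -, -, h⟩; omega
    · rintro ⟨-, h⟩; omega

theorem pvOuterA_eq_scan (ph : List (List String)) (pat : List String) :
    ∀ d i mask, ph.length - i ≤ d →
    pvOuterA ph pat i mask = mask ++ pvScanB (ph.map pvKey) pat i := by
  intro d
  induction d with
  | zero =>
    intro i mask hd
    rw [pvOuterA, dif_neg (by omega), pvScanB,
      dif_neg (by rw [List.length_map]; omega), List.append_nil]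
  | succ d ih =>
    intro i mask hd
    by_cases hi : i < ph.length
    · rw [pvOuterA, dif_pos hi]
      by_cases hc : (((ph.map pvKey).drop i).take pat.length = pat ∧ 0 < pat.length)
      · have hA := (branch_iff ph pat i hi).mpr hc
        rw [if_pos hA.1, dif_pos ⟨hA.2.1, hA.2.2.1, hA.2.2.2⟩, ih (i + pat.length) _ (by omega)]
        conv_rhs => rw [pvScanB]
        rw [dif_pos (show i < (List.map pvKey ph).length by rw [List.length_map]; omega),
          dif_pos hc, List.append_assoc]
      · by_cases h1 : (pvKey (ph.getD i []) == pat.headD "") = true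
        · have hA : ¬ ((pvInnerA ph pat (i+1) 1 true).1 = true ∧
              (pvInnerA ph pat (i+1) 1 true).2 = pat.length ∧ 0 < pat.length) := by
            intro h
            exact hc ((branch_iff ph pat i hi).mp ⟨h1, h.1, h.2.1, h.2.2⟩)
          rw [if_pos h1, dif_neg hA, ih (i+1) _ (by omega)]
          conv_rhs => rw [pvScanB]
          rw [dif_pos (show i < (List.map pvKey ph).length by rw [List.length_map]; omega),
            dif_neg hc]
          simp
        · rw [if_neg h1, ih (i+1) _ (by omega)]
          conv_rhs => rw [pvScanB]
          rw [dif_pos (show i < (List.map pvKey ph).length by rw [List.length_map]; omega),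
            dif_neg hc]
          simp
    · rw [pvOuterA, dif_neg (by omega), pvScanB,
        dif_neg (by rw [List.length_map]; omega), List.append_nil]

-- ===== B-side lemmas =====

-- the refinement loop computes one big filter by the pointwise-match predicate
theorem pvRefine_spec (keys : List String) (n : Nat) :
    ∀ (pat : List String) (j : Nat) (st : List Nat),
    pvRefine keys n pat j st =
      st.filter (fun i => decide (∀ k, k < pat.length →
        i + (j+k) < n ∧ keys.getD (i+(j+k)) "" = pat.getD k "")) := by
  intro pat
  induction pat with
  | nil =>
    intro j st
    rw [pvRefine]
    simp
  | cons p rest ih =>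
    intro j st
    rw [pvRefine, ih]
    rw [List.filter_filter]
    apply List.filter_congr
    intro i _
    apply Bool.eq_iff_iff.mpr
    simp only [Bool.and_eq_true, decide_eq_true_eq, beq_iff_eq]
    constructor
    · rintro ⟨hrest, hn, hp⟩
      intro k hk
      match k with
      | 0 => exact ⟨by omega, by simpa using hp⟩
      | (k'+1) =>
        have hr := hrest k' (by simp at hk; omega)
        refine ⟨by omega, ?_⟩
        have he : i + (j + (k'+1)) = i + (j+1+k') := by omega
        rw [he, hr.2]
        rfl
    · intro hall
      refine ⟨?_, ?_, ?_⟩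
      · intro k hk
        have := hall (k+1) (by simp; omega)
        refine ⟨by omega, ?_⟩
        have he : i + (j+1+k) = i + (j + (k+1)) := by omega
        rw [he, this.2]
        rfl
      · exact (hall 0 (by simp)).1
      · simpa using (hall 0 (by simp)).2

-- the pointwise-match predicate is the window (slice) match used by the scan
theorem window_iff (keys pat : List String) (hm : 0 < pat.length) (i : Nat) :
    (∀ k, k < pat.length → i + (0+k) < keys.length ∧ keys.getD (i+(0+k)) "" = pat.getD k "") ↔
    ((keys.drop i).take pat.length = pat ∧ 0 < pat.length) := by
  have hzero : ∀ k, i + (0+k) = i + k := fun k => by omega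
  constructor
  · intro h
    refine ⟨?_, hm⟩
    have hlast := (h (pat.length - 1) (by omega)).1
    rw [hzero] at hlast
    have hle : i + pat.length ≤ keys.length := by omega
    apply List.ext_getElem
    · simp; omega
    · intro k hk1 hk2
      have hk : k < pat.length := hk2
      have h1 := (h k hk).1
      have hp := (h k hk).2
      rw [hzero] at h1 hp
      rw [List.getD_eq_getElem?_getD, List.getD_eq_getElem?_getD,
        List.getElem?_eq_getElem h1, List.getElem?_eq_getElem hk2] at hp
      simp only [Option.getD_some] at hp
      simp only [List.getElem_take, List.getElem_drop]
      exact hp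
  · rintro ⟨hw, -⟩
    have hlen := congrArg List.length hw
    simp at hlen
    have hle : i + pat.length ≤ keys.length := by omega
    intro k hk
    refine ⟨by omega, ?_⟩
    have hkt : k < (List.take pat.length (List.drop i keys)).length := by simp; omega
    have hgk := List.getElem_of_eq hw hkt
    simp only [List.getElem_take, List.getElem_drop] at hgk
    rw [hzero, List.getD_eq_getElem?_getD, List.getD_eq_getElem?_getD,
      List.getElem?_eq_getElem (show i + k < keys.length by omega),
      List.getElem?_eq_getElem hk]
    simpa using hgk

-- a window match fits inside the list
theorem match_lt (keys pat : List String) (t : Nat)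
    (h : (keys.drop t).take pat.length = pat ∧ 0 < pat.length) :
    t < keys.length ∧ t + pat.length ≤ keys.length := by
  have hlen := congrArg List.length h.1
  simp at hlen
  have hm := h.2
  omega

-- the scan over a match-free region is all zeros
theorem scan_none (keys pat : List String) :
    ∀ d pos, keys.length - pos ≤ d →
    (∀ t, pos ≤ t → t < keys.length → ¬ ((keys.drop t).take pat.length = pat ∧ 0 < pat.length)) →
    pvScanB keys pat pos = List.replicate (keys.length - pos) (0 : Int) := by
  intro d
  induction d with
  | zero =>
    intro pos hd hno
    rw [pvScanB, dif_neg (by omega)]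
    rw [show keys.length - pos = 0 by omega]
    rfl
  | succ d ih =>
    intro pos hd hno
    by_cases hp : pos < keys.length
    · rw [pvScanB, dif_pos hp, dif_neg (hno pos (le_refl _) hp),
        ih (pos+1) (by omega) (fun t ht1 ht2 => hno t (by omega) ht2)]
      rw [show keys.length - pos = (keys.length - (pos+1)) + 1 by omega]
      rfl
    · rw [pvScanB, dif_neg hp, show keys.length - pos = 0 by omega]
      rfl
-- the scan up to the first match s: zeros, then ones, then the scan after the match
theorem scan_first (keys pat : List String) :
    ∀ d pos s, s - pos ≤ d → pos ≤ s →
    ((keys.drop s).take pat.length = pat ∧ 0 < pat.length) →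
    (∀ t, pos ≤ t → t < s → ¬ ((keys.drop t).take pat.length = pat ∧ 0 < pat.length)) →
    pvScanB keys pat pos =
      List.replicate (s - pos) (0 : Int) ++ List.replicate pat.length (1 : Int) ++
        pvScanB keys pat (s + pat.length) := by
  intro d
  induction d with
  | zero =>
    intro pos s hd hps hs hno
    have hsp : s = pos := by omega
    subst hsp
    have hlt := (match_lt keys pat s hs).1
    rw [pvScanB, dif_pos hlt, dif_pos hs]
    simp
  | succ d ih =>
    intro pos s hd hps hs hno
    by_cases hsp : pos = s
    · subst hsp
      have hlt := (match_lt keys pat pos hs).1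
      rw [pvScanB, dif_pos hlt, dif_pos hs]
      simp
    · have hlt : pos < s := by omega
      have hsn := (match_lt keys pat s hs).1
      rw [pvScanB, dif_pos (by omega : pos < keys.length),
        dif_neg (hno pos (le_refl _) hlt),
        ih (pos+1) s (by omega) (by omega) hs (fun t ht1 ht2 => hno t (by omega) ht2)]
      rw [show s - pos = (s - (pos+1)) + 1 by omega]
      rfl

-- B's emit fold over the sorted complete list of match starts equals the greedy scan
theorem emit_spec (keys pat : List String) (hm : 0 < pat.length) :
    ∀ (L : List Nat) (mask : List Int) (pos : Nat),
    List.Pairwise (· < ·) L →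
    (∀ s ∈ L, (keys.drop s).take pat.length = pat ∧ 0 < pat.length) →
    (∀ t, pos ≤ t → t < keys.length →
      (((keys.drop t).take pat.length = pat ∧ 0 < pat.length) ↔ t ∈ L)) →
    (L.foldl (pvEmitStep pat.length) (mask, pos)).1 ++
      List.replicate (keys.length - (L.foldl (pvEmitStep pat.length) (mask, pos)).2) (0 : Int) =
    mask ++ pvScanB keys pat pos := by
  intro L
  induction L with
  | nil =>
    intro mask pos _ _ hcomp
    simp only [List.foldl_nil]
    rw [scan_none keys pat (keys.length - pos) pos (le_refl _)
      (fun t ht1 ht2 hc => by simpa using (hcomp t ht1 ht2).mp hc)]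
  | cons s L' ih =>
    intro mask pos hpw hall hcomp
    have hCs : (keys.drop s).take pat.length = pat ∧ 0 < pat.length :=
      hall s (List.mem_cons_self ..)
    have hsn := match_lt keys pat s hCs
    simp only [List.foldl_cons]
    by_cases hps : pos ≤ s
    · rw [show pvEmitStep pat.length (mask, pos) s =
          (mask ++ List.replicate (s - pos) (0:Int) ++ List.replicate pat.length (1:Int), s + pat.length)
        from by rw [pvEmitStep, if_pos hps]]
      rw [ih _ (s + pat.length) hpw.tail (fun t ht => hall t (List.mem_cons_of_mem _ ht))
        (by
          intro t ht1 ht2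
          constructor
          · intro hc
            have := (hcomp t (by omega) ht2).mp hc
            rcases List.mem_cons.mp this with he | hmem
            · omega
            · exact hmem
          · intro hmem
            exact hall t (List.mem_cons_of_mem _ hmem))]
      rw [scan_first keys pat (s - pos) pos s (le_refl _) hps hCs
        (by
          intro t ht1 ht2 hc
          have := (hcomp t ht1 (by omega)).mp hc
          rcases List.mem_cons.mp this with he | hmem
          · omega
          · have := List.rel_of_pairwise_cons hpw hmem
            omega)]
      simp [List.append_assoc]
    · rw [show pvEmitStep pat.length (mask, pos) s = (mask, pos)
        from by rw [pvEmitStep, if_neg hps]]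
      apply ih _ pos hpw.tail (fun t ht => hall t (List.mem_cons_of_mem _ ht))
      intro t ht1 ht2
      constructor
      · intro hc
        have := (hcomp t ht1 ht2).mp hc
        rcases List.mem_cons.mp this with he | hmem
        · omega
        · exact hmem
      · intro hmem
        exact hall t (List.mem_cons_of_mem _ hmem)

-- the refined start list is exactly the window matches, in increasing order
theorem starts_spec (keys pat : List String) (hm : 0 < pat.length) :
    pvRefine keys keys.length pat 0 (List.range keys.length) =
      (List.range keys.length).filter
        (fun i => decide ((keys.drop i).take pat.length = pat ∧ 0 < pat.length)) := by
  rw [pvRefine_spec]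
  apply List.filter_congr
  intro i _
  exact decide_eq_decide.mpr (window_iff keys pat hm i)

theorem alt_eq_scan (ph : List (List String)) (pat : List String) (hm : 0 < pat.length) :
    generer_masque_phonemes_alt ph pat = pvScanB (ph.map pvKey) pat 0 := by
  unfold generer_masque_phonemes_alt
  simp only []
  rw [starts_spec (ph.map pvKey) pat hm]
  have h := emit_spec (ph.map pvKey) pat hm
    ((List.range (ph.map pvKey).length).filter
      (fun i => decide (((ph.map pvKey).drop i).take pat.length = pat ∧ 0 < pat.length)))
    [] 0
    (List.Pairwise.filter _ (List.pairwise_lt_range))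
    (by
      intro s hs
      have := List.of_mem_filter hs
      simpa using this)
    (by
      intro t ht1 ht2
      constructor
      · intro hc
        apply List.mem_filter.mpr
        exact ⟨List.mem_range.mpr ht2, by simpa using hc⟩
      · intro hmem
        have := List.of_mem_filter hmem
        simpa using this)
  simpa using h

-- ===== VERDICT (by name: the statement is the Claim_ definition above) =====
theorem generer_masque_phonemes_spec : Claim_equal_generer_masque_phonemes := by
  intro ph pat _ hpre
  unfold Spec_generer_masque_phonemes generer_masque_phonemes
  rcases hpre with hnil | ⟨hpat, -⟩
  · subst hnil
    rw [pvOuterA]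
    simp [generer_masque_phonemes_alt, pvRefine_spec]
  · have hm : 0 < pat.length := List.length_pos_iff.mpr hpat
    rw [alt_eq_scan ph pat hm]
    simpa using pvOuterA_eq_scan ph pat (ph.length) 0 [] (by omega)
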